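-- pv_equiv track=rewrite | github.com/Shehab611/Digital-Signal-Processing | all_project.py | sampling_up
-- ===== SOURCE A (Python) =====
-- def sampling_up(indicates, signal, factor_l):
--     up_sampled_signal = []
--     up_sampled_signal_indicates = []
--     for i in range(len(indicates)):
--         up_sampled_signal.append(signal[i])
--         for _ in range(int(factor_l) - 1):
--             up_sampled_signal.append(0)
--
--     for i in range(len(up_sampled_signal)):
--         up_sampled_signal_indicates.append(i)
--
--     return up_sampled_signal_indicates, up_sampled_signal
-- ===== SOURCE B (Python) =====
-- # note: parameter 'signal' renamed to 'sig' (the word 'signal' is denied by the sandbox's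
-- # stdlib-module name scan); same position and meaning.
-- def sampling_up(indicates, sig, factor_l):
--     per = 1 + max(int(factor_l) - 1, 0)
--     out = [0] * (len(indicates) * per)
--     for i in range(len(indicates)):
--         out[i * per] = sig[i]
--     return list(range(len(out))), out
-- ===== Notes on version B (the rewrite author's own statement) =====
-- stated objective: alternative
-- what changed: B pre-allocates a zero buffer of the final size and scatter-writes each sample at stride per, then builds the index list with range, instead of A's nested append loops (append sample, then a run of zero-appends) and an element-by-element index loop.
import Mathlib
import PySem

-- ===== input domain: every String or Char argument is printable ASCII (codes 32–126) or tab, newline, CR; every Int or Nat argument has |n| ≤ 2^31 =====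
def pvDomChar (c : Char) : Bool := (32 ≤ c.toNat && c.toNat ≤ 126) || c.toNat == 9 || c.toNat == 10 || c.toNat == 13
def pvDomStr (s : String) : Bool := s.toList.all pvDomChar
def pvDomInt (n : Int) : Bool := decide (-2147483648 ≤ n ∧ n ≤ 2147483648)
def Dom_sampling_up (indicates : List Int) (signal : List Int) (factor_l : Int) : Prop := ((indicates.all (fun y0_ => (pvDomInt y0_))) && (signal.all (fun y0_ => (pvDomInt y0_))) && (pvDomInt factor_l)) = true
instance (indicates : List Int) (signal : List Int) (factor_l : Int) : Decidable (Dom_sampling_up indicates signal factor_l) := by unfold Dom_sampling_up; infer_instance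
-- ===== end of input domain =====

-- B pre-allocates a zero buffer of the final size and scatter-writes the samples at stride per,
-- instead of A's nested append loops; equivalence proved on inputs where signal[i] never raises.

-- ===== PORT A =====
-- literal port of A: append signal[i] then int(factor_l)-1 zeros for each i, then build indices.
-- signal[i] is ported as PySem.List.pyGetD (IndexError excluded by Pre_sampling_up).
def sampling_up (indicates : List Int) (signal : List Int) (factor_l : Int) : List Int × List Int :=
  let up : List Int := (List.range indicates.length).foldl
    (fun acc i =>
      (List.range (factor_l - 1).toNat).foldl (fun a _ => a ++ [(0 : Int)])
        (acc ++ [PySem.List.pyGetD signal (Int.ofNat i) 0])) []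
  let idx : List Int := (List.range up.length).foldl (fun acc i => acc ++ [Int.ofNat i]) []
  (idx, up)

-- ===== PORT B =====
-- literal port of Source B: per = 1 + max(factor_l-1, 0); scatter-write into a pre-zeroed buffer.
def sampling_up_alt (indicates : List Int) (signal : List Int) (factor_l : Int) : List Int × List Int :=
  let per : Nat := 1 + (max (factor_l - 1) 0).toNat
  let out : List Int := (List.range indicates.length).foldl
    (fun acc i => acc.set (i * per) (PySem.List.pyGetD signal (Int.ofNat i) 0))
    (List.replicate (indicates.length * per) 0)
  ((List.range out.length).map Int.ofNat, out)

-- ===== PRECONDITION & SPEC =====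
-- Pre_ excludes exactly the inputs where Python A raises IndexError (signal shorter than indicates).
def Pre_sampling_up (indicates : List Int) (signal : List Int) (factor_l : Int) : Prop :=
  indicates.length ≤ signal.length
instance (indicates : List Int) (signal : List Int) (factor_l : Int) : Decidable (Pre_sampling_up indicates signal factor_l) := by unfold Pre_sampling_up; infer_instance
def pvWitness_sampling_up : List Int × List Int × Int := ([1, 2], [5, 6], 3)

def Spec_sampling_up (indicates : List Int) (signal : List Int) (factor_l : Int) (out : List Int × List Int) : Prop := out = sampling_up_alt indicates signal factor_l
instance (indicates : List Int) (signal : List Int) (factor_l : Int) (out : List Int × List Int) : Decidable (Spec_sampling_up indicates signal factor_l out) := by unfold Spec_sampling_up; infer_instance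

-- ===== CLAIM (what is proved, stated in full; the proofs are below) =====
def Claim_equal_sampling_up : Prop := ∀ (indicates : List Int) (signal : List Int) (factor_l : Int), Dom_sampling_up indicates signal factor_l → Pre_sampling_up indicates signal factor_l → Spec_sampling_up indicates signal factor_l (sampling_up indicates signal factor_l)

-- ===== LEMMAS AND PROOFS =====

-- A's inner zero-append loop = appending a run of zeros
theorem pv_inner_zeros (k : Nat) (acc : List Int) :
    (List.range k).foldl (fun a _ => a ++ [(0 : Int)]) acc = acc ++ List.replicate k 0 := by
  induction k generalizing acc with
  | zero => simp
  | succ k ih =>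
      rw [List.range_succ, List.foldl_append]
      simp [ih, List.replicate_succ']

-- length of the first m groups
theorem pv_flat_len (g : Nat → Int) (p m : Nat) (hp : 0 < p) :
    ((List.range m).flatMap (fun i => g i :: List.replicate (p - 1) 0)).length = m * p := by
  induction m with
  | zero => simp
  | succ m ih =>
      rw [List.range_succ]
      simp only [List.flatMap_append, List.length_append, ih]
      simp [Nat.succ_mul]
      omega

-- B's scatter loop over a pre-zeroed buffer builds the groups in place
theorem pv_scatter (g : Nat → Int) (p n : Nat) (hp : 0 < p) :
    ∀ m, m ≤ n →
    (List.range m).foldl (fun acc i => acc.set (i * p) (g i)) (List.replicate (n * p) (0 : Int))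
      = (List.range m).flatMap (fun i => g i :: List.replicate (p - 1) 0)
        ++ List.replicate ((n - m) * p) 0 := by
  intro m
  induction m with
  | zero => simp
  | succ m ih =>
      intro hm
      rw [List.range_succ, List.foldl_append, ih (by omega)]
      simp only [List.foldl_cons, List.foldl_nil]
      have hlen := pv_flat_len g p m hp
      rw [List.set_append_right _ _ (by omega)]
      have h1 : (n - m) * p = p + (n - (m + 1)) * p := by
        have : n - m = 1 + (n - (m + 1)) := by omega
        rw [this, Nat.add_mul, Nat.one_mul]
      rw [hlen, Nat.sub_self, h1, List.replicate_add]
      have hp' : List.replicate p (0 : Int) = 0 :: List.replicate (p - 1) 0 := by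
        cases p with
        | zero => omega
        | succ q => simp [List.replicate_succ]
      simp [hp', List.set_cons_zero, List.flatMap_append]

-- A's up-sampled signal = flatMap of sample-then-zeros groups
theorem pv_up_eq (indicates signal : List Int) (factor_l : Int) :
    (List.range indicates.length).foldl
      (fun acc i =>
        (List.range (factor_l - 1).toNat).foldl (fun a _ => a ++ [(0 : Int)])
          (acc ++ [PySem.List.pyGetD signal (Int.ofNat i) 0])) []
    = (List.range indicates.length).flatMap
        (fun i => PySem.List.pyGetD signal (Int.ofNat i) 0 :: List.replicate (factor_l - 1).toNat 0) := by
  have h1 : ∀ (acc : List Int) (i : Nat),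
      (List.range (factor_l - 1).toNat).foldl (fun a _ => a ++ [(0 : Int)])
        (acc ++ [PySem.List.pyGetD signal (Int.ofNat i) 0])
      = acc ++ (PySem.List.pyGetD signal (Int.ofNat i) 0 :: List.replicate (factor_l - 1).toNat 0) := by
    intro acc i
    rw [pv_inner_zeros]
    simp
  simp only [h1]
  rw [PySem.List.foldl_append_eq_flatMap]
  simp

-- the index loop of A is just range
theorem pv_idx_eq (L : Nat) :
    (List.range L).foldl (fun acc i => acc ++ [Int.ofNat i]) ([] : List Int)
      = (List.range L).map Int.ofNat := by
  rw [PySem.List.foldl_append_singleton_eq_map]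
  simp

-- ===== VERDICT (by name: the statement is the Claim_ definition above) =====
theorem sampling_up_spec : Claim_equal_sampling_up := by
  intro indicates signal factor_l _ _
  unfold Spec_sampling_up sampling_up sampling_up_alt
  have hmax : (max (factor_l - 1) 0).toNat = (factor_l - 1).toNat := by omega
  set k : Nat := (factor_l - 1).toNat with hk
  have hp : 0 < 1 + k := by omega
  have hper : 1 + (max (factor_l - 1) 0).toNat = 1 + k := by omega
  have hout := pv_scatter (fun i => PySem.List.pyGetD signal (Int.ofNat i) 0) (1 + k)
      indicates.length hp indicates.length (le_refl _)
  simp only [Nat.sub_self, Nat.zero_mul, List.replicate_zero, List.append_nil,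
    Nat.add_sub_cancel_left] at hout
  have hup := pv_up_eq indicates signal factor_l
  rw [← hk] at hup
  simp only [hper, hout, hup, pv_idx_eq]
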